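-- pv_equiv track=rewrite | github.com/miguellgramacho96/fermats-last-theorem | theorem.py | check_fermats_last_theorem
-- ===== SOURCE A (Python) =====
-- def check_fermats_last_theorem(start, end, toThePowerOf):
--     if toThePowerOf <= 2:
--         raise ValueError("Your power must be greater than 2.")
--     for a in range(start, end):
--         for b in range(start, end):
--             for c in range(start, end):
--                 if a**toThePowerOf + b**toThePowerOf == c**toThePowerOf:
--                     return (a, b, c)
--     return None
-- ===== SOURCE B (Python) =====
-- def check_fermats_last_theorem(start, end, toThePowerOf):
--     if toThePowerOf <= 2:
--         raise ValueError("Your power must be greater than 2.")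
--     powers = {}
--     for c in range(start, end):
--         key = c ** toThePowerOf
--         if key not in powers:
--             powers[key] = c
--     for a in range(start, end):
--         for b in range(start, end):
--             c = powers.get(a ** toThePowerOf + b ** toThePowerOf)
--             if c is not None:
--                 return (a, b, c)
--     return None
-- ===== Notes on version B (the rewrite author's own statement) =====
-- stated objective: alternative
-- what changed: Replaces the innermost c-scan by a dict built once mapping c**n to the smallest such c (first-insert wins, c ascending), turning the triple loop into a dict build plus a double loop with O(1) lookup; intended as asymptotically lighter (O(r^2) vs O(r^3) loop iterations) but a timing run could not confirm a speedup on the generated inputs, so no speed is claimed.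
import Mathlib
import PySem

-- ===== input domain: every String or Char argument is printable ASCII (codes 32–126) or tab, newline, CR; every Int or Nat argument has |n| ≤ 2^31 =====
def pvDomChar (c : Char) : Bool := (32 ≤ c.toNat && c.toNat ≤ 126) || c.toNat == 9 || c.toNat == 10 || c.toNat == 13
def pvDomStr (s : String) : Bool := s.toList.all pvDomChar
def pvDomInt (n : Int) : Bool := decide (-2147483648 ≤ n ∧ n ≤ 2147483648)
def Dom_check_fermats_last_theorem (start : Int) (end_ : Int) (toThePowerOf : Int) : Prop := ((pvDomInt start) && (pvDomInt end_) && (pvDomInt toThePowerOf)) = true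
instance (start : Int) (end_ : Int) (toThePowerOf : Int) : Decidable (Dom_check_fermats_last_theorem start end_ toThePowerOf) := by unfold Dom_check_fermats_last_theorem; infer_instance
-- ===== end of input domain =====

-- B replaces A's innermost c-scan by a dict from c**n to the smallest such c, built once
-- before the a/b loops (alternative algorithm: fewer loop iterations; no speedup measured).

-- ===== PORT A =====
def check_fermats_last_theorem (start : Int) (end_ : Int) (toThePowerOf : Int) : Option (Int × Int × Int) :=
  -- the `raise` for toThePowerOf ≤ 2 is excluded by Pre_
  let k := toThePowerOf.toNat
  (PySem.List.pyRange start end_ 1).findSome? (fun a =>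
    (PySem.List.pyRange start end_ 1).findSome? (fun b =>
      (PySem.List.pyRange start end_ 1).findSome? (fun c =>
        if a ^ k + b ^ k = c ^ k then some (a, b, c) else none)))

-- ===== PORT B =====
-- the `powers` dict built by B's first loop (insert only if the key is absent)
def fermatPowDict (start : Int) (end_ : Int) (k : Nat) : PySem.Dict Int Int :=
  (PySem.List.pyRange start end_ 1).foldl
    (fun d c => if d.contains (c ^ k) then d else d.insert (c ^ k) c) PySem.Dict.empty

def check_fermats_last_theorem_alt (start : Int) (end_ : Int) (toThePowerOf : Int) : Option (Int × Int × Int) :=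
  -- the `raise` for toThePowerOf ≤ 2 is excluded by Pre_
  let k := toThePowerOf.toNat
  let powers := fermatPowDict start end_ k
  (PySem.List.pyRange start end_ 1).findSome? (fun a =>
    (PySem.List.pyRange start end_ 1).findSome? (fun b =>
      match powers.get? (a ^ k + b ^ k) with
      | some c => some (a, b, c)
      | none => none))

-- ===== PRECONDITION & SPEC =====
-- Pre_ excludes toThePowerOf ≤ 2, where the Python A raises ValueError.
def Pre_check_fermats_last_theorem (start : Int) (end_ : Int) (toThePowerOf : Int) : Prop := 2 < toThePowerOf
instance (start : Int) (end_ : Int) (toThePowerOf : Int) : Decidable (Pre_check_fermats_last_theorem start end_ toThePowerOf) := by unfold Pre_check_fermats_last_theorem; infer_instance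
def pvWitness_check_fermats_last_theorem : Int × Int × Int := (-2, 3, 3)

def Spec_check_fermats_last_theorem (start : Int) (end_ : Int) (toThePowerOf : Int) (out : Option (Int × Int × Int)) : Prop := out = check_fermats_last_theorem_alt start end_ toThePowerOf
instance (start : Int) (end_ : Int) (toThePowerOf : Int) (out : Option (Int × Int × Int)) : Decidable (Spec_check_fermats_last_theorem start end_ toThePowerOf out) := by unfold Spec_check_fermats_last_theorem; infer_instance

-- ===== CLAIM (what is proved, stated in full; the proofs are below) =====
def Claim_equal_check_fermats_last_theorem : Prop := ∀ (start : Int) (end_ : Int) (toThePowerOf : Int), Dom_check_fermats_last_theorem start end_ toThePowerOf → Pre_check_fermats_last_theorem start end_ toThePowerOf → Spec_check_fermats_last_theorem start end_ toThePowerOf (check_fermats_last_theorem start end_ toThePowerOf)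

-- ===== LEMMAS AND PROOFS =====

-- The insert-if-absent fold's lookup is the first c in L with c^k = s (first-insert wins).
lemma get?_fermatFold (L : List Int) (k : Nat) (d : PySem.Dict Int Int) (s : Int) :
    (L.foldl (fun d c => if d.contains (c ^ k) then d else d.insert (c ^ k) c) d).get? s
      = (d.get? s).or (L.findSome? (fun c => if s = c ^ k then some c else none)) := by
  induction L generalizing d with
  | nil => simp
  | cons c L ih =>
    simp only [List.foldl_cons, List.findSome?_cons]
    by_cases hc : d.contains (c ^ k)
    · rw [if_pos hc, ih]
      by_cases hs : s = c ^ k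
      · have : (d.get? s).isSome := by
          rw [← PySem.Dict.contains_eq_isSome_get?, hs]; exact hc
        cases hd : d.get? s with
        | none => simp [hd] at this
        | some v => simp [hs]
      · simp [hs]
    · rw [if_neg hc, ih, PySem.Dict.get?_insert]
      by_cases hs : s = c ^ k
      · have hd : d.get? s = none := by
          cases hd : d.get? s with
          | none => rfl
          | some v =>
            exfalso; apply hc
            rw [← hs, PySem.Dict.contains_eq_isSome_get?, hd]; rfl
        have hd' : d.get? (c ^ k) = none := hs ▸ hd
        simp [hs, hd']
      · simp [hs]

lemma map_findSome? {α β : Type} (g : α → β) (f : α → Option α) (L : List α) :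
    (L.findSome? f).map g = L.findSome? (fun c => (f c).map g) := by
  induction L with
  | nil => rfl
  | cons c L ih =>
    simp only [List.findSome?_cons]
    cases f c <;> simp [ih]

theorem check_fermats_last_theorem_spec : Claim_equal_check_fermats_last_theorem := by
  intro start end_ n _ _
  unfold Spec_check_fermats_last_theorem check_fermats_last_theorem check_fermats_last_theorem_alt
  simp only []
  congr 1
  funext a
  congr 1
  funext b
  have hd : (fermatPowDict start end_ n.toNat).get? (a ^ n.toNat + b ^ n.toNat)
      = (PySem.List.pyRange start end_ 1).findSome?
          (fun c => if a ^ n.toNat + b ^ n.toNat = c ^ n.toNat then some c else none) := by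
    rw [fermatPowDict, get?_fermatFold]
    simp
  rw [hd]
  have := map_findSome? (fun c => (a, b, c))
    (fun c => if a ^ n.toNat + b ^ n.toNat = c ^ n.toNat then some c else none)
    (PySem.List.pyRange start end_ 1)
  simp only [apply_ite (Option.map (fun c => (a, b, c))), Option.map_some, Option.map_none] at this
  rw [← this]
  cases (PySem.List.pyRange start end_ 1).findSome?
      (fun c => if a ^ n.toNat + b ^ n.toNat = c ^ n.toNat then some c else none) with
  | none => rfl
  | some c => rfl
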